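-- pv_equiv track=rewrite | github.com/gkstmdwn/Python_Studies | 진택닉네임생성기.py | taek
-- ===== SOURCE A (Python) =====
-- def taek(sex, step = 4):
--     if step == 1:
--         return sex
--     elif step == 4:
--         ans = []
--         ans_before = taek(sex, step=3)
--         for i in ans_before:
--             for j in sex:
--                 ans.append(i + j)
--         for i in range(len(ans)):
--             ans[i] += "진택"
--         return ans
--     else:
--         ans = []
--         ans_before = taek(sex, step = step-1)
--         for i in ans_before:
--             for j in sex:
--                 ans.append(i + j)
--         return ans
-- ===== SOURCE B (Python) =====
-- def taek(sex, step=4):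
--     if step == 1:
--         return sex
--     ans = list(sex)
--     for k in range(2, step + 1):
--         ans = [i + j for i in ans for j in sex]
--         if k == 4:
--             ans = [i + "진택" for i in ans]
--     return ans
-- ===== Notes on version B (the rewrite author's own statement) =====
-- stated objective: simpler
-- what changed: Replaces A's recursion on step (with a special recursive case for step==4) by one iterative loop that repeatedly takes the product with sex and appends the suffix right after the 4th round.
-- crash fix: On step <= 0 A recurses without reaching a base case and raises RecursionError; B's loop runs zero times and returns sex unchanged. — e.g. on taek(["a"], 0): A raises RecursionError, B returns ["a"]
import Mathlib
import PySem

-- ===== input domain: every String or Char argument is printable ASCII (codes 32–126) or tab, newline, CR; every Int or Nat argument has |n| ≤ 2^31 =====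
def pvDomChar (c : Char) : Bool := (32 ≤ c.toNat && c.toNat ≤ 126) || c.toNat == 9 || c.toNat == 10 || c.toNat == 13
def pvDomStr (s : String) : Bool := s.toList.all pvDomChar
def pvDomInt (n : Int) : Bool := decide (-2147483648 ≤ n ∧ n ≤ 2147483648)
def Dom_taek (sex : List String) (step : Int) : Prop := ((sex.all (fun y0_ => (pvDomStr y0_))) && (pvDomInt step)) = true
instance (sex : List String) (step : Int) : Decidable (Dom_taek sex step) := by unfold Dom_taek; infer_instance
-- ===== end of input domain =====

-- B replaces A's recursion on step by a single iterative product loop (simpler decomposition, same cost).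

-- ===== PORT A =====
-- Recursion on step; the 'step ≤ 0 → []' guard only makes the Lean function total:
-- there Python A recurses forever (RecursionError), and Pre_taek excludes those inputs.
def taek (sex : List String) (step : Int) : List String :=
  if _h0 : step ≤ 0 then []
  else if _h1 : step = 1 then sex
  else if _h4 : step = 4 then
    ((taek sex 3).foldl (fun ans i => sex.foldl (fun ans j => ans ++ [i ++ j]) ans) []).map
      (fun s => s ++ "진택")
  else
    (taek sex (step - 1)).foldl (fun ans i => sex.foldl (fun ans j => ans ++ [i ++ j]) ans) []
termination_by step.toNat
decreasing_by
  · omega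
  · omega

-- ===== PORT B =====
def taek_alt (sex : List String) (step : Int) : List String :=
  if step = 1 then sex
  else
    (PySem.List.pyRange 2 (step + 1) 1).foldl
      (fun ans k =>
        let ans2 := ans.flatMap (fun i => sex.map (fun j => i ++ j))
        if k = 4 then ans2.map (fun s => s ++ "진택") else ans2)
      sex

-- ===== PRECONDITION & SPEC =====
-- Pre_ excludes step ≤ 0, where Python A recurses without a base case and raises RecursionError.
def Pre_taek (sex : List String) (step : Int) : Prop := 1 ≤ step
instance (sex : List String) (step : Int) : Decidable (Pre_taek sex step) := by unfold Pre_taek; infer_instance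
def pvWitness_taek : List String × Int := (["a", "b"], 4)

-- On step ≤ 0 A raises RecursionError (no base case is reached) while B's loop runs zero times and returns sex.
def Raises_taek (sex : List String) (step : Int) : Prop := step ≤ 0
instance (sex : List String) (step : Int) : Decidable (Raises_taek sex step) := by unfold Raises_taek; infer_instance
def pvRaiseWitness_taek : List String × Int := (["a"], 0)
def pvRaiseWitnessOut_taek : List String := ["a"]

def Spec_taek (sex : List String) (step : Int) (out : List String) : Prop := out = taek_alt sex step
instance (sex : List String) (step : Int) (out : List String) : Decidable (Spec_taek sex step out) := by unfold Spec_taek; infer_instance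

-- ===== CLAIM (what is proved, stated in full; the proofs are below) =====
def Claim_equal_taek : Prop := ∀ (sex : List String) (step : Int), Dom_taek sex step → Pre_taek sex step → Spec_taek sex step (taek sex step)
def Claim_raises_taek : Prop := (∀ (sex : List String) (step : Int), Dom_taek sex step → Raises_taek sex step → ¬ Pre_taek sex step) ∧ (Dom_taek (pvRaiseWitness_taek.1) (pvRaiseWitness_taek.2) ∧ Raises_taek (pvRaiseWitness_taek.1) (pvRaiseWitness_taek.2) ∧ taek_alt (pvRaiseWitness_taek.1) (pvRaiseWitness_taek.2) = pvRaiseWitnessOut_taek)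

-- ===== LEMMAS AND PROOFS =====

-- A's nested append loop builds exactly the flatMap product.
theorem buildA (sex ab acc : List String) :
    ab.foldl (fun ans i => sex.foldl (fun ans j => ans ++ [i ++ j]) ans) acc
      = acc ++ ab.flatMap (fun i => sex.map (fun j => i ++ j)) := by
  have h : (fun (ans : List String) (i : String) =>
      sex.foldl (fun ans j => ans ++ [i ++ j]) ans)
      = fun ans i => ans ++ sex.map (fun j => i ++ j) := by
    funext ans i
    exact PySem.List.foldl_append_singleton_eq_map (fun j => i ++ j) sex ans
  rw [h, PySem.List.foldl_append_eq_flatMap]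

-- B's loop body, named for the proof.
def stepB (sex : List String) (ans : List String) (k : Int) : List String :=
  let ans2 := ans.flatMap (fun i => sex.map (fun j => i ++ j))
  if k = 4 then ans2.map (fun s => s ++ "진택") else ans2

theorem taek_alt_eq_foldl (sex : List String) (step : Int) (h : step ≠ 1) :
    taek_alt sex step = (PySem.List.pyRange 2 (step + 1) 1).foldl (stepB sex) sex := by
  unfold taek_alt stepB
  simp [h]

theorem key (sex : List String) : ∀ n : Nat, 1 ≤ n → taek sex (n : Int) = taek_alt sex (n : Int) := by
  intro n
  induction n using Nat.strong_induction_on with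
  | _ n ih =>
    intro h1
    rcases Nat.lt_or_ge n 2 with h2 | h2
    · -- n = 1
      have : n = 1 := by omega
      subst this
      rw [taek, taek_alt]
      norm_num
    · -- n ≥ 2
      have hne1 : (n : Int) ≠ 1 := by omega
      have hpos : ¬ ((n : Int) ≤ 0) := by omega
      have hsplit : PySem.List.pyRange 2 ((n : Int) + 1) 1
          = PySem.List.pyRange 2 (n : Int) 1 ++ [(n : Int)] := by
        exact PySem.List.pyRange_one_succ_right (by omega)
      have hprev : (PySem.List.pyRange 2 (n : Int) 1).foldl (stepB sex) sex
          = taek sex ((n : Int) - 1) := by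
        rcases Nat.lt_or_ge n 3 with h3 | h3
        · -- n = 2 : empty range, and taek sex 1 = sex
          have : n = 2 := by omega
          subst this
          rw [PySem.List.pyRange_one_eq_nil (by norm_num)]
          rw [taek]; norm_num
        · -- n ≥ 3 : previous value is taek_alt sex (n-1) by IH
          have hcast : ((n : Int) - 1) = ((n - 1 : Nat) : Int) := by omega
          rw [hcast, ih (n - 1) (by omega) (by omega),
              taek_alt_eq_foldl sex _ (by omega)]
          congr 1
          congr 1
          omega
      rw [taek_alt_eq_foldl sex _ hne1, hsplit, List.foldl_append]
      simp only [List.foldl_cons, List.foldl_nil]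
      by_cases h4 : (n : Int) = 4
      · -- step = 4
        rw [taek]
        simp only [h4]
        rw [buildA, stepB, if_pos rfl]
        have : taek sex 3 = (PySem.List.pyRange 2 (n : Int) 1).foldl (stepB sex) sex := by
          rw [hprev, h4]; norm_num
        rw [this, h4]
        norm_num
      · -- step ≥ 2, ≠ 4
        rw [taek]
        simp only [hpos, hne1, h4, dif_neg, not_false_iff]
        rw [buildA, stepB, if_neg h4, hprev]
        simp

-- ===== VERDICT (by name: the statement is the Claim_ definition above) =====
theorem taek_spec : Claim_equal_taek := by
  intro sex step _ hpre
  unfold Spec_taek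
  unfold Pre_taek at hpre
  have hn : step = ((step.toNat : Nat) : Int) := by omega
  rw [hn]
  exact key sex step.toNat (by omega)

theorem taek_raises : Claim_raises_taek := by
  unfold Claim_raises_taek
  exact ⟨fun sex step _ hr => by unfold Raises_taek at hr; unfold Pre_taek; omega, by decide⟩

-- witness self-check: the raise-witness value asserted above is the one taek_alt computes
theorem pvRaiseWitness_taek_ok :
    taek_alt pvRaiseWitness_taek.1 pvRaiseWitness_taek.2 = pvRaiseWitnessOut_taek :=
  taek_raises.2.2.2
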